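-- pv_equiv track=rewrite | github.com/DrDaveShaw/INCHEM-Py | modules/inchem_import.py | numba_reactions
-- ===== SOURCE A (Python) =====
-- import copy
--
-- def numba_reactions(reactions_in):
--     '''
--     Conversion of reactions from MCM facsimile download to numba
--
--     inputs:
--         reactions_in = list of reactions
--
--     returns:
--         numba_reactions_in = list of reactions with numba functions
--                              replacing regular functions
--     '''
--     numba_reactions_in=copy.deepcopy(reactions_in)
--
--     for reaction in numba_reactions_in:
--         reaction[0]=reaction[0].replace('exp','numba_exp')
--         reaction[0]=reaction[0].replace('log10','numba_log10')
--         reaction[0]=reaction[0].replace('TEMP','temp')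
--         reaction[0]=reaction[0].replace('sqrt','numba_sqrt')
--     return numba_reactions_in
-- ===== SOURCE B (Python) =====
-- def numba_reactions(reactions_in):
--     '''Single left-to-right scan per reaction string instead of four chained
--     str.replace passes; rebuilds the list-of-lists instead of deepcopy.'''
--     out = []
--     for reaction in reactions_in:
--         s = reaction[0]
--         parts = []
--         i = 0
--         n = len(s)
--         while i < n:
--             if s.startswith('exp', i):
--                 parts.append('numba_exp'); i += 3
--             elif s.startswith('log10', i):
--                 parts.append('numba_log10'); i += 5
--             elif s.startswith('TEMP', i):
--                 parts.append('temp'); i += 4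
--             elif s.startswith('sqrt', i):
--                 parts.append('numba_sqrt'); i += 4
--             else:
--                 parts.append(s[i]); i += 1
--         out.append([''.join(parts)] + list(reaction[1:]))
--     return out
-- ===== Notes on version B (the rewrite author's own statement) =====
-- stated objective: alternative
-- what changed: Replaces A's four sequential whole-string str.replace passes (plus deepcopy) with a single left-to-right scan per reaction string that matches the four patterns positionally and emits replacements in one pass, rebuilding the result lists.
-- intended difference: On inputs where a reaction string contains 'sqrTEMP', A's TEMP->temp pass creates a fresh 'sqrt' that its later pass rewrites (A returns e.g. 'numba_sqrtemp'), while B returns the intended 'sqrtemp': a replacement pass should not rewrite text it created itself. — e.g. on numba_reactions([["sqrTEMP"]]): A returns [["numba_sqrtemp"]], B returns [["sqrtemp"]]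
import Mathlib
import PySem

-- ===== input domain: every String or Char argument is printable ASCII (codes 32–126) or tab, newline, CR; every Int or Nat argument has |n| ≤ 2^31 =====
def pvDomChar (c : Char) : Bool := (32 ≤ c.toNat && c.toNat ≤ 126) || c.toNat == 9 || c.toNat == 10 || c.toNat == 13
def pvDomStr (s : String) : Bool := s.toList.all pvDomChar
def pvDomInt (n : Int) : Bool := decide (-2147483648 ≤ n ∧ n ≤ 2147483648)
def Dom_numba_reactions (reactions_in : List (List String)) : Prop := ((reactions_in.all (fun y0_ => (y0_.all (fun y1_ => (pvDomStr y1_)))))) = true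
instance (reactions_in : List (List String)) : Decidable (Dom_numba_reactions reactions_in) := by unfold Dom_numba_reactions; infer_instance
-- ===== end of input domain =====

-- B replaces A's four chained str.replace passes by one left-to-right scan per reaction
-- string (alternative decomposition, same cost class); A mutates a deepcopy in place while B
-- rebuilds fresh lists — the equivalence proved here is about the RETURN value only.

-- ===== PORT A =====
-- A raises IndexError on an empty reaction list (reaction[0]); the [] arm below is only
-- reached outside Pre_numba_reactions.
def numba_reactions (reactions_in : List (List String)) : List (List String) :=
  reactions_in.map (fun reaction =>
    match reaction with
    | [] => []
    | s :: rest =>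
      PySem.Str.replace (PySem.Str.replace (PySem.Str.replace
        (PySem.Str.replace s "exp" "numba_exp") "log10" "numba_log10")
        "TEMP" "temp") "sqrt" "numba_sqrt" :: rest)

-- ===== PORT B =====
-- Source B's while-loop over positions: at each position the four s.startswith(pat, i) tests in
-- order, ported as literal pattern match on the remaining characters (exact on every input).
def pvScan : List Char → List Char
  | 'e' :: 'x' :: 'p' :: t => ['n','u','m','b','a','_','e','x','p'] ++ pvScan t
  | 'l' :: 'o' :: 'g' :: '1' :: '0' :: t => ['n','u','m','b','a','_','l','o','g','1','0'] ++ pvScan t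
  | 'T' :: 'E' :: 'M' :: 'P' :: t => ['t','e','m','p'] ++ pvScan t
  | 's' :: 'q' :: 'r' :: 't' :: t => ['n','u','m','b','a','_','s','q','r','t'] ++ pvScan t
  | c :: t => c :: pvScan t
  | [] => []

-- Source B raises IndexError on an empty reaction list too (reaction[0]); [] arm outside Pre_.
def numba_reactions_alt (reactions_in : List (List String)) : List (List String) :=
  reactions_in.map (fun reaction =>
    match reaction with
    | [] => []
    | s :: rest => String.ofList (pvScan s.toList) :: rest)

-- ===== PRECONDITION & SPEC =====
-- Pre_ excludes inputs containing an empty reaction list, on which both A and B raise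
-- IndexError at reaction[0].
def Pre_numba_reactions (reactions_in : List (List String)) : Prop :=
  ∀ r ∈ reactions_in, r ≠ []
instance (reactions_in : List (List String)) : Decidable (Pre_numba_reactions reactions_in) := by
  unfold Pre_numba_reactions; infer_instance

def pvWitness_numba_reactions : List (List String) := [["5.6e-34*exp(TEMP/300)", "O2"]]

-- On reaction strings containing "sqrTEMP", A's TEMP→temp pass manufactures a fresh "sqrt"
-- which its later pass rewrites (e.g. "sqrTEMP" ↦ "numba_sqrtemp"), while B returns the
-- intended "sqrtemp": a replacement pass must not rewrite text it created itself.
def D_numba_reactions (reactions_in : List (List String)) : Prop :=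
  (reactions_in.any (fun r => PySem.Str.isIn "sqrTEMP" (r.headD ""))) = true
instance (reactions_in : List (List String)) : Decidable (D_numba_reactions reactions_in) := by
  unfold D_numba_reactions; infer_instance

def Spec_numba_reactions (reactions_in : List (List String)) (out : List (List String)) : Prop :=
  ¬ D_numba_reactions reactions_in → out = numba_reactions_alt reactions_in
instance (reactions_in : List (List String)) (out : List (List String)) :
    Decidable (Spec_numba_reactions reactions_in out) := by
  unfold Spec_numba_reactions; infer_instance

def pvDiffWitness_numba_reactions : List (List String) := [["sqrTEMP"]]
def pvDiffWitnessOut_numba_reactions : (List (List String)) × (List (List String)) :=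
  ([["numba_sqrtemp"]], [["sqrtemp"]])

-- ===== CLAIM (what is proved, stated in full; the proofs are below) =====
def Claim_unchanged_numba_reactions : Prop :=
  ∀ (reactions_in : List (List String)), Dom_numba_reactions reactions_in →
    Pre_numba_reactions reactions_in →
    Spec_numba_reactions reactions_in (numba_reactions reactions_in)

def Claim_changed_numba_reactions : Prop :=
  Dom_numba_reactions (pvDiffWitness_numba_reactions) ∧
  Pre_numba_reactions (pvDiffWitness_numba_reactions) ∧
  D_numba_reactions (pvDiffWitness_numba_reactions) ∧
  numba_reactions (pvDiffWitness_numba_reactions) = pvDiffWitnessOut_numba_reactions.1 ∧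
  numba_reactions_alt (pvDiffWitness_numba_reactions) = pvDiffWitnessOut_numba_reactions.2 ∧
  pvDiffWitnessOut_numba_reactions.1 ≠ pvDiffWitnessOut_numba_reactions.2

def Claim_exact_numba_reactions : Prop :=
  ∀ (reactions_in : List (List String)), Dom_numba_reactions reactions_in →
    Pre_numba_reactions reactions_in → D_numba_reactions reactions_in →
    numba_reactions reactions_in ≠ numba_reactions_alt reactions_in

-- ===== LEMMAS AND PROOFS =====

theorem pvGoAcc (old new : List Char) (fuel : Nat) (l acc : List Char) :
    PySem.Chars.replace.go old new fuel l acc = acc.reverse ++ PySem.Chars.replace.go old new fuel l [] := by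
  induction fuel generalizing l acc with
  | zero => simp [PySem.Chars.replace.go]
  | succ f ih =>
    cases l with
    | nil => simp [PySem.Chars.replace.go]
    | cons c t =>
      rw [PySem.Chars.replace.go, PySem.Chars.replace.go]
      split_ifs with h
      · rw [ih _ (new.reverse ++ acc), ih _ (new.reverse ++ [])]
        simp
      · rw [ih _ (c :: acc), ih _ (c :: [])]
        simp

theorem pvGoFuel (old new : List Char) (hold : old ≠ []) :
    ∀ (f1 f2 : Nat) (l acc : List Char), l.length ≤ f1 → l.length ≤ f2 →
      PySem.Chars.replace.go old new f1 l acc = PySem.Chars.replace.go old new f2 l acc := by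
  intro f1
  induction f1 with
  | zero =>
    intro f2 l acc h1 h2
    have hl : l = [] := by cases l <;> simp_all
    subst hl
    cases f2 <;> simp [PySem.Chars.replace.go]
  | succ f ih =>
    intro f2 l acc h1 h2
    cases l with
    | nil => cases f2 <;> simp [PySem.Chars.replace.go]
    | cons c t =>
      cases f2 with
      | zero => simp at h2
      | succ g =>
        rw [PySem.Chars.replace.go, PySem.Chars.replace.go]
        split_ifs with hp
        · have ho : 1 ≤ old.length := by cases old <;> simp_all
          exact ih g _ _ (by simp at h1 ⊢; omega) (by simp at h2 ⊢; omega)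
        · exact ih g t _ (by simpa using h1) (by simpa using h2)

theorem pvRepNil (old new : List Char) (hold : old ≠ []) :
    PySem.Chars.replace [] old new = [] := by
  simp [PySem.Chars.replace, hold, PySem.Chars.replace.go]

theorem pvRepMatch (old new l : List Char) (hold : old ≠ []) (h : old.isPrefixOf l = true) :
    PySem.Chars.replace l old new = new ++ PySem.Chars.replace (l.drop old.length) old new := by
  cases l with
  | nil =>
    cases old with
    | nil => simp at hold
    | cons o os => simp [List.isPrefixOf] at h
  | cons c t =>
    have ho : 1 ≤ old.length := by cases old <;> simp_all
    simp only [PySem.Chars.replace, List.length_cons]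
    rw [PySem.Chars.replace.go]
    simp only [h, if_true]
    rw [pvGoAcc]
    rw [pvGoFuel old new hold t.length (List.drop old.length (c :: t)).length _ []
        (by simp; omega) (le_refl _)]
    simp [hold]

theorem pvRepNomatch (old new : List Char) (c : Char) (t : List Char) (hold : old ≠ [])
    (h : old.isPrefixOf (c :: t) = false) :
    PySem.Chars.replace (c :: t) old new = c :: PySem.Chars.replace t old new := by
  simp only [PySem.Chars.replace, List.length_cons]
  rw [PySem.Chars.replace.go]
  simp only [h]
  rw [pvGoAcc old new t.length t [c]]
  simp [hold]

theorem pvRepPass (o : Char) (os new p x : List Char) (hp : o ∉ p) :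
    PySem.Chars.replace (p ++ x) (o :: os) new = p ++ PySem.Chars.replace x (o :: os) new := by
  induction p with
  | nil => simp
  | cons c p' ih =>
    have hc : o ≠ c := by intro he; exact hp (he ▸ List.mem_cons_self)
    rw [List.cons_append, pvRepNomatch _ _ _ _ (by simp)
        (by simp [List.isPrefixOf, hc])]
    rw [ih (fun hm => hp (List.mem_cons_of_mem _ hm))]
    simp

theorem pvRepReflect (old : List Char) (new : List Char) (hold : old ≠ []) (hnew : new ≠ []) :
    ∀ (y q : List Char), (∀ a ∈ q, a ∉ new) →
      q.isPrefixOf (PySem.Chars.replace y old new) = true → q.isPrefixOf y = true := by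
  intro y
  induction y with
  | nil =>
    intro q hq h
    rw [pvRepNil _ _ hold] at h
    cases q <;> simp_all [List.isPrefixOf]
  | cons c t ih =>
    intro q hq h
    cases q with
    | nil => simp [List.isPrefixOf]
    | cons a q' =>
      cases hm : old.isPrefixOf (c :: t) with
      | true =>
        rw [pvRepMatch _ _ _ hold hm] at h
        cases new with
        | nil => simp at hnew
        | cons b bs =>
          exfalso
          simp only [List.cons_append, List.isPrefixOf, Bool.and_eq_true, beq_iff_eq] at h
          exact hq a List.mem_cons_self (h.1 ▸ List.mem_cons_self)
      | false =>
        rw [pvRepNomatch _ _ _ _ hold hm] at h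
        simp only [List.isPrefixOf, Bool.and_eq_true, beq_iff_eq] at h ⊢
        exact ⟨h.1, ih q' (fun a ha => hq a (List.mem_cons_of_mem _ ha)) h.2⟩

theorem pvReflT1 (y : List Char)
    (h : ['t'].isPrefixOf (PySem.Chars.replace y ['T','E','M','P'] ['t','e','m','p']) = true) :
    ['t'].isPrefixOf y = true ∨ ['T','E','M','P'].isPrefixOf y = true := by
  cases y with
  | nil => rw [pvRepNil _ _ (by simp)] at h; simp [List.isPrefixOf] at h
  | cons c t =>
    cases hm : List.isPrefixOf ['T','E','M','P'] (c :: t) with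
    | true => exact Or.inr rfl
    | false =>
      rw [pvRepNomatch _ _ _ _ (by simp) hm] at h
      simp only [List.isPrefixOf, Bool.and_eq_true, beq_iff_eq] at h ⊢
      exact Or.inl h

theorem pvReflT2 (y : List Char)
    (h : ['r','t'].isPrefixOf (PySem.Chars.replace y ['T','E','M','P'] ['t','e','m','p']) = true) :
    ['r','t'].isPrefixOf y = true ∨ ['r','T','E','M','P'].isPrefixOf y = true := by
  cases y with
  | nil => rw [pvRepNil _ _ (by simp)] at h; simp [List.isPrefixOf] at h
  | cons c t =>
    cases hm : List.isPrefixOf ['T','E','M','P'] (c :: t) with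
    | true =>
      rw [pvRepMatch _ _ _ (by simp) hm] at h
      simp [List.isPrefixOf, List.cons_append] at h
    | false =>
      rw [pvRepNomatch _ _ _ _ (by simp) hm] at h
      simp only [List.isPrefixOf, Bool.and_eq_true, beq_iff_eq] at h ⊢
      rcases pvReflT1 t h.2 with h1 | h1
      · exact Or.inl ⟨h.1, h1⟩
      · exact Or.inr ⟨h.1, h1⟩

theorem pvReflT3 (y : List Char)
    (h : ['q','r','t'].isPrefixOf (PySem.Chars.replace y ['T','E','M','P'] ['t','e','m','p']) = true) :
    ['q','r','t'].isPrefixOf y = true ∨ ['q','r','T','E','M','P'].isPrefixOf y = true := by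
  cases y with
  | nil => rw [pvRepNil _ _ (by simp)] at h; simp [List.isPrefixOf] at h
  | cons c t =>
    cases hm : List.isPrefixOf ['T','E','M','P'] (c :: t) with
    | true =>
      rw [pvRepMatch _ _ _ (by simp) hm] at h
      simp [List.isPrefixOf, List.cons_append] at h
    | false =>
      rw [pvRepNomatch _ _ _ _ (by simp) hm] at h
      simp only [List.isPrefixOf, Bool.and_eq_true, beq_iff_eq] at h ⊢
      rcases pvReflT2 t h.2 with h1 | h1
      · exact Or.inl ⟨h.1, h1⟩
      · exact Or.inr ⟨h.1, h1⟩

theorem pvReflLE (q t : List Char)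
    (hNL : ∀ a ∈ q, a ∉ ['n','u','m','b','a','_','l','o','g','1','0'])
    (hNE : ∀ a ∈ q, a ∉ ['n','u','m','b','a','_','e','x','p'])
    (h : q.isPrefixOf (PySem.Chars.replace
        (PySem.Chars.replace t ['e','x','p'] ['n','u','m','b','a','_','e','x','p'])
        ['l','o','g','1','0'] ['n','u','m','b','a','_','l','o','g','1','0']) = true) :
    q.isPrefixOf t = true :=
  pvRepReflect ['e','x','p'] ['n','u','m','b','a','_','e','x','p'] (by simp) (by simp) t q hNE
    (pvRepReflect ['l','o','g','1','0'] ['n','u','m','b','a','_','l','o','g','1','0']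
      (by simp) (by simp) _ q hNL h)

theorem pvScan_nil : pvScan [] = [] := rfl
theorem pvScan_e (t : List Char) :
    pvScan (['e','x','p'] ++ t) = ['n','u','m','b','a','_','e','x','p'] ++ pvScan t := rfl
theorem pvScan_l (t : List Char) :
    pvScan (['l','o','g','1','0'] ++ t) = ['n','u','m','b','a','_','l','o','g','1','0'] ++ pvScan t := rfl
theorem pvScan_T (t : List Char) :
    pvScan (['T','E','M','P'] ++ t) = ['t','e','m','p'] ++ pvScan t := rfl
theorem pvScan_q (t : List Char) :
    pvScan (['s','q','r','t'] ++ t) = ['n','u','m','b','a','_','s','q','r','t'] ++ pvScan t := rfl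

theorem pvScan_nomatch (c : Char) (t : List Char)
    (hE : List.isPrefixOf ['e','x','p'] (c :: t) = false)
    (hL : List.isPrefixOf ['l','o','g','1','0'] (c :: t) = false)
    (hT : List.isPrefixOf ['T','E','M','P'] (c :: t) = false)
    (hQ : List.isPrefixOf ['s','q','r','t'] (c :: t) = false) :
    pvScan (c :: t) = c :: pvScan t := by
  rw [pvScan.eq_def]
  split
  · next t' heq => rw [heq] at hE; simp [List.isPrefixOf] at hE
  · next t' heq => rw [heq] at hL; simp [List.isPrefixOf] at hL
  · next t' heq => rw [heq] at hT; simp [List.isPrefixOf] at hT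
  · next t' heq => rw [heq] at hQ; simp [List.isPrefixOf] at hQ
  · rename_i c' t' heq
    cases heq; rfl
  · rename_i heq
    simp at heq

theorem pvInfixTail (q : List Char) (c : Char) (t : List Char)
    (h : q <:+: c :: t) (hp : q.isPrefixOf (c :: t) = false) : q <:+: t := by
  rcases List.infix_cons_iff.mp h with h1 | h1
  · rw [List.isPrefixOf_iff_prefix.mpr h1] at hp; cases hp
  · exact h1

-- one no-match step of the four chained replaces, provided "sqrTEMP" is not at this position
theorem pvRep4Step (c : Char) (t : List Char)
    (hE : List.isPrefixOf ['e','x','p'] (c :: t) = false)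
    (hL : List.isPrefixOf ['l','o','g','1','0'] (c :: t) = false)
    (hT : List.isPrefixOf ['T','E','M','P'] (c :: t) = false)
    (hQ : List.isPrefixOf ['s','q','r','t'] (c :: t) = false)
    (hP : List.isPrefixOf ['s','q','r','T','E','M','P'] (c :: t) = false) :
    PySem.Chars.replace (PySem.Chars.replace (PySem.Chars.replace
      (PySem.Chars.replace (c :: t) ['e','x','p'] ['n','u','m','b','a','_','e','x','p'])
      ['l','o','g','1','0'] ['n','u','m','b','a','_','l','o','g','1','0'])
      ['T','E','M','P'] ['t','e','m','p'])
      ['s','q','r','t'] ['n','u','m','b','a','_','s','q','r','t']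
    = c :: PySem.Chars.replace (PySem.Chars.replace (PySem.Chars.replace
      (PySem.Chars.replace t ['e','x','p'] ['n','u','m','b','a','_','e','x','p'])
      ['l','o','g','1','0'] ['n','u','m','b','a','_','l','o','g','1','0'])
      ['T','E','M','P'] ['t','e','m','p'])
      ['s','q','r','t'] ['n','u','m','b','a','_','s','q','r','t'] := by
  rw [pvRepNomatch _ _ _ _ (by simp) hE]
  have hL2 : List.isPrefixOf ['l','o','g','1','0']
      (c :: PySem.Chars.replace t ['e','x','p'] ['n','u','m','b','a','_','e','x','p']) = false := by
    cases hx : List.isPrefixOf ['l','o','g','1','0']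
        (c :: PySem.Chars.replace t ['e','x','p'] ['n','u','m','b','a','_','e','x','p']) with
    | false => rfl
    | true =>
      exfalso
      simp only [List.isPrefixOf, Bool.and_eq_true, beq_iff_eq] at hx
      have hpre := pvRepReflect ['e','x','p'] ['n','u','m','b','a','_','e','x','p']
        (by simp) (by simp) t ['o','g','1','0'] (by simp) hx.2
      rw [← hx.1] at hL
      simp only [List.isPrefixOf] at hL
      simp [hpre] at hL
  rw [pvRepNomatch _ _ _ _ (by simp) hL2]
  have hT2 : List.isPrefixOf ['T','E','M','P']
      (c :: PySem.Chars.replace (PySem.Chars.replace t ['e','x','p'] ['n','u','m','b','a','_','e','x','p'])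
        ['l','o','g','1','0'] ['n','u','m','b','a','_','l','o','g','1','0']) = false := by
    cases hx : List.isPrefixOf ['T','E','M','P'] (c :: _) with
    | false => rfl
    | true =>
      exfalso
      simp only [List.isPrefixOf, Bool.and_eq_true, beq_iff_eq] at hx
      have hpre := pvReflLE ['E','M','P'] t (by simp) (by simp) hx.2
      rw [← hx.1] at hT
      simp only [List.isPrefixOf] at hT
      simp [hpre] at hT
  rw [pvRepNomatch _ _ _ _ (by simp) hT2]
  have hQ2 : List.isPrefixOf ['s','q','r','t']
      (c :: PySem.Chars.replace (PySem.Chars.replace (PySem.Chars.replace t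
        ['e','x','p'] ['n','u','m','b','a','_','e','x','p'])
        ['l','o','g','1','0'] ['n','u','m','b','a','_','l','o','g','1','0'])
        ['T','E','M','P'] ['t','e','m','p']) = false := by
    cases hx : List.isPrefixOf ['s','q','r','t'] (c :: _) with
    | false => rfl
    | true =>
      exfalso
      simp only [List.isPrefixOf, Bool.and_eq_true, beq_iff_eq] at hx
      rcases pvReflT3 _ hx.2 with h1 | h1
      · have hpre := pvReflLE ['q','r','t'] t (by simp) (by simp) h1
        rw [← hx.1] at hQ
        simp only [List.isPrefixOf] at hQ
        simp [hpre] at hQ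
      · have hpre := pvReflLE ['q','r','T','E','M','P'] t (by simp) (by simp) h1
        rw [← hx.1] at hP
        simp only [List.isPrefixOf] at hP
        simp [hpre] at hP
  rw [pvRepNomatch _ _ _ _ (by simp) hQ2]

theorem pvMain (n : Nat) : ∀ (cs : List Char), cs.length ≤ n →
    ¬ (['s','q','r','T','E','M','P'] <:+: cs) →
    PySem.Chars.replace (PySem.Chars.replace (PySem.Chars.replace
      (PySem.Chars.replace cs ['e','x','p'] ['n','u','m','b','a','_','e','x','p'])
      ['l','o','g','1','0'] ['n','u','m','b','a','_','l','o','g','1','0'])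
      ['T','E','M','P'] ['t','e','m','p'])
      ['s','q','r','t'] ['n','u','m','b','a','_','s','q','r','t'] = pvScan cs := by
  induction n with
  | zero =>
    intro cs hlen _
    have hnil : cs = [] := by cases cs <;> simp_all
    subst hnil
    rw [pvRepNil _ _ (by simp), pvRepNil _ _ (by simp), pvRepNil _ _ (by simp),
        pvRepNil _ _ (by simp), pvScan_nil]
  | succ m ih =>
    intro cs hlen hinf
    cases cs with
    | nil =>
      rw [pvRepNil _ _ (by simp), pvRepNil _ _ (by simp), pvRepNil _ _ (by simp),
          pvRepNil _ _ (by simp), pvScan_nil]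
    | cons c t =>
      cases hE : List.isPrefixOf ['e','x','p'] (c :: t) with
      | true =>
        obtain ⟨rest, hr⟩ := List.isPrefixOf_iff_prefix.mp hE
        rw [← hr]
        rw [pvRepMatch _ _ _ (by simp) (List.isPrefixOf_iff_prefix.mpr (List.prefix_append _ _))]
        rw [List.drop_left]
        rw [pvRepPass 'l' _ _ _ _ (by simp), pvRepPass 'T' _ _ _ _ (by simp),
            pvRepPass 's' _ _ _ _ (by simp)]
        rw [ih rest (by rw [← hr] at hlen; simp at hlen ⊢; omega)
            (fun h => hinf (by rw [← hr]; exact h.trans (List.IsSuffix.isInfix (List.suffix_append _ _))))]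
        rw [pvScan_e]
      | false =>
      cases hL : List.isPrefixOf ['l','o','g','1','0'] (c :: t) with
      | true =>
        obtain ⟨rest, hr⟩ := List.isPrefixOf_iff_prefix.mp hL
        rw [← hr]
        rw [pvRepPass 'e' _ _ _ _ (by simp)]
        rw [pvRepMatch _ _ _ (by simp) (List.isPrefixOf_iff_prefix.mpr (List.prefix_append _ _))]
        rw [List.drop_left]
        rw [pvRepPass 'T' _ _ _ _ (by simp), pvRepPass 's' _ _ _ _ (by simp)]
        rw [ih rest (by rw [← hr] at hlen; simp at hlen ⊢; omega)
            (fun h => hinf (by rw [← hr]; exact h.trans (List.IsSuffix.isInfix (List.suffix_append _ _))))]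
        rw [pvScan_l]
      | false =>
      cases hT : List.isPrefixOf ['T','E','M','P'] (c :: t) with
      | true =>
        obtain ⟨rest, hr⟩ := List.isPrefixOf_iff_prefix.mp hT
        rw [← hr]
        rw [pvRepPass 'e' _ _ _ _ (by simp), pvRepPass 'l' _ _ _ _ (by simp)]
        rw [pvRepMatch _ _ _ (by simp) (List.isPrefixOf_iff_prefix.mpr (List.prefix_append _ _))]
        rw [List.drop_left]
        rw [pvRepPass 's' _ _ _ _ (by simp)]
        rw [ih rest (by rw [← hr] at hlen; simp at hlen ⊢; omega)
            (fun h => hinf (by rw [← hr]; exact h.trans (List.IsSuffix.isInfix (List.suffix_append _ _))))]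
        rw [pvScan_T]
      | false =>
      cases hQ : List.isPrefixOf ['s','q','r','t'] (c :: t) with
      | true =>
        obtain ⟨rest, hr⟩ := List.isPrefixOf_iff_prefix.mp hQ
        rw [← hr]
        rw [pvRepPass 'e' _ _ _ _ (by simp), pvRepPass 'l' _ _ _ _ (by simp),
            pvRepPass 'T' _ _ _ _ (by simp)]
        rw [pvRepMatch _ _ _ (by simp) (List.isPrefixOf_iff_prefix.mpr (List.prefix_append _ _))]
        rw [List.drop_left]
        rw [ih rest (by rw [← hr] at hlen; simp at hlen ⊢; omega)
            (fun h => hinf (by rw [← hr]; exact h.trans (List.IsSuffix.isInfix (List.suffix_append _ _))))]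
        rw [pvScan_q]
      | false =>
        have hP : List.isPrefixOf ['s','q','r','T','E','M','P'] (c :: t) = false := by
          cases hx : List.isPrefixOf ['s','q','r','T','E','M','P'] (c :: t) with
          | false => rfl
          | true =>
            exact absurd (List.IsPrefix.isInfix (List.isPrefixOf_iff_prefix.mp hx)) hinf
        rw [pvRep4Step c t hE hL hT hQ hP]
        rw [ih t (by simp at hlen ⊢; omega) (fun h => hinf (List.infix_cons h))]
        rw [pvScan_nomatch c t hE hL hT hQ]

theorem pvStrEq (s : String) (h : ¬ (['s','q','r','T','E','M','P'] <:+: s.toList)) :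
    PySem.Str.replace (PySem.Str.replace (PySem.Str.replace
      (PySem.Str.replace s "exp" "numba_exp") "log10" "numba_log10")
      "TEMP" "temp") "sqrt" "numba_sqrt" = String.ofList (pvScan s.toList) := by
  have hx := pvMain s.toList.length s.toList le_rfl h
  calc PySem.Str.replace (PySem.Str.replace (PySem.Str.replace
        (PySem.Str.replace s "exp" "numba_exp") "log10" "numba_log10")
        "TEMP" "temp") "sqrt" "numba_sqrt"
      = String.ofList ((PySem.Str.replace (PySem.Str.replace (PySem.Str.replace
          (PySem.Str.replace s "exp" "numba_exp") "log10" "numba_log10")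
          "TEMP" "temp") "sqrt" "numba_sqrt").toList) := by
        rw [String.ofList_toList]
    _ = String.ofList (pvScan s.toList) := by
        apply congrArg
        rw [PySem.Str.toList_replace, PySem.Str.toList_replace, PySem.Str.toList_replace,
            PySem.Str.toList_replace]
        exact hx

theorem pvTight (n : Nat) : ∀ (cs : List Char), cs.length ≤ n →
    (['s','q','r','T','E','M','P'] <:+: cs) →
    PySem.Chars.replace (PySem.Chars.replace (PySem.Chars.replace
      (PySem.Chars.replace cs ['e','x','p'] ['n','u','m','b','a','_','e','x','p'])
      ['l','o','g','1','0'] ['n','u','m','b','a','_','l','o','g','1','0'])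
      ['T','E','M','P'] ['t','e','m','p'])
      ['s','q','r','t'] ['n','u','m','b','a','_','s','q','r','t'] ≠ pvScan cs := by
  induction n with
  | zero =>
    intro cs hlen hinf
    have hnil : cs = [] := by cases cs <;> simp_all
    subst hnil
    simp at hinf
  | succ m ih =>
    intro cs hlen hinf
    cases cs with
    | nil => simp at hinf
    | cons c t =>
      cases hP : List.isPrefixOf ['s','q','r','T','E','M','P'] (c :: t) with
      | true =>
        obtain ⟨rest, hr⟩ := List.isPrefixOf_iff_prefix.mp hP
        rw [← hr]
        rw [pvRepPass 'e' _ _ _ _ (by simp), pvRepPass 'l' _ _ _ _ (by simp)]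
        rw [show (['s','q','r','T','E','M','P'] : List Char) = ['s','q','r'] ++ ['T','E','M','P'] from rfl,
            List.append_assoc]
        rw [pvRepPass 'T' _ _ _ _ (by simp)]
        rw [pvRepMatch _ _ _ (by simp) (List.isPrefixOf_iff_prefix.mpr (List.prefix_append _ _))]
        rw [List.drop_left]
        simp only [List.cons_append, List.nil_append]
        rw [show ('s' :: 'q' :: 'r' :: 't' :: 'e' :: 'm' :: 'p' ::
              PySem.Chars.replace (PySem.Chars.replace
                (PySem.Chars.replace rest ['e','x','p'] ['n','u','m','b','a','_','e','x','p'])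
                ['l','o','g','1','0'] ['n','u','m','b','a','_','l','o','g','1','0'])
                ['T','E','M','P'] ['t','e','m','p'] : List Char)
            = ['s','q','r','t'] ++ ('e' :: 'm' :: 'p' ::
              PySem.Chars.replace (PySem.Chars.replace
                (PySem.Chars.replace rest ['e','x','p'] ['n','u','m','b','a','_','e','x','p'])
                ['l','o','g','1','0'] ['n','u','m','b','a','_','l','o','g','1','0'])
                ['T','E','M','P'] ['t','e','m','p']) from rfl]
        rw [pvRepMatch _ _ _ (by simp) (List.isPrefixOf_iff_prefix.mpr (List.prefix_append _ _))]
        rw [List.drop_left]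
        rw [show ('e' :: 'm' :: 'p' ::
              PySem.Chars.replace (PySem.Chars.replace
                (PySem.Chars.replace rest ['e','x','p'] ['n','u','m','b','a','_','e','x','p'])
                ['l','o','g','1','0'] ['n','u','m','b','a','_','l','o','g','1','0'])
                ['T','E','M','P'] ['t','e','m','p'] : List Char)
            = ['e','m','p'] ++
              PySem.Chars.replace (PySem.Chars.replace
                (PySem.Chars.replace rest ['e','x','p'] ['n','u','m','b','a','_','e','x','p'])
                ['l','o','g','1','0'] ['n','u','m','b','a','_','l','o','g','1','0'])
                ['T','E','M','P'] ['t','e','m','p'] from rfl]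
        rw [pvRepPass 's' _ _ _ _ (by simp)]
        have hscan : pvScan ('s' :: 'q' :: 'r' :: 'T' :: 'E' :: 'M' :: 'P' :: rest)
            = 's' :: pvScan ('q' :: 'r' :: 'T' :: 'E' :: 'M' :: 'P' :: rest) :=
          pvScan_nomatch _ _ (by simp [List.isPrefixOf]) (by simp [List.isPrefixOf])
            (by simp [List.isPrefixOf]) (by simp [List.isPrefixOf])
        rw [hscan]
        intro heq
        simp [List.cons_append] at heq
      | false =>
      cases hE : List.isPrefixOf ['e','x','p'] (c :: t) with
      | true =>
        obtain ⟨rest, hr⟩ := List.isPrefixOf_iff_prefix.mp hE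
        rw [← hr]
        rw [pvRepMatch _ _ _ (by simp) (List.isPrefixOf_iff_prefix.mpr (List.prefix_append _ _))]
        rw [List.drop_left]
        rw [pvRepPass 'l' _ _ _ _ (by simp), pvRepPass 'T' _ _ _ _ (by simp),
            pvRepPass 's' _ _ _ _ (by simp)]
        rw [pvScan_e]
        have hinf' : ['s','q','r','T','E','M','P'] <:+: rest := by
          rw [← hr] at hinf
          simp only [List.cons_append, List.nil_append] at hinf
          exact pvInfixTail _ _ _ (pvInfixTail _ _ _ (pvInfixTail _ _ _ hinf
            (by simp [List.isPrefixOf])) (by simp [List.isPrefixOf])) (by simp [List.isPrefixOf])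
        intro heq
        exact ih rest (by rw [← hr] at hlen; simp at hlen ⊢; omega) hinf'
          (List.append_cancel_left heq)
      | false =>
      cases hL : List.isPrefixOf ['l','o','g','1','0'] (c :: t) with
      | true =>
        obtain ⟨rest, hr⟩ := List.isPrefixOf_iff_prefix.mp hL
        rw [← hr]
        rw [pvRepPass 'e' _ _ _ _ (by simp)]
        rw [pvRepMatch _ _ _ (by simp) (List.isPrefixOf_iff_prefix.mpr (List.prefix_append _ _))]
        rw [List.drop_left]
        rw [pvRepPass 'T' _ _ _ _ (by simp), pvRepPass 's' _ _ _ _ (by simp)]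
        rw [pvScan_l]
        have hinf' : ['s','q','r','T','E','M','P'] <:+: rest := by
          rw [← hr] at hinf
          simp only [List.cons_append, List.nil_append] at hinf
          exact pvInfixTail _ _ _ (pvInfixTail _ _ _ (pvInfixTail _ _ _ (pvInfixTail _ _ _
            (pvInfixTail _ _ _ hinf (by simp [List.isPrefixOf])) (by simp [List.isPrefixOf]))
            (by simp [List.isPrefixOf])) (by simp [List.isPrefixOf])) (by simp [List.isPrefixOf])
        intro heq
        exact ih rest (by rw [← hr] at hlen; simp at hlen ⊢; omega) hinf'
          (List.append_cancel_left heq)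
      | false =>
      cases hT : List.isPrefixOf ['T','E','M','P'] (c :: t) with
      | true =>
        obtain ⟨rest, hr⟩ := List.isPrefixOf_iff_prefix.mp hT
        rw [← hr]
        rw [pvRepPass 'e' _ _ _ _ (by simp), pvRepPass 'l' _ _ _ _ (by simp)]
        rw [pvRepMatch _ _ _ (by simp) (List.isPrefixOf_iff_prefix.mpr (List.prefix_append _ _))]
        rw [List.drop_left]
        rw [pvRepPass 's' _ _ _ _ (by simp)]
        rw [pvScan_T]
        have hinf' : ['s','q','r','T','E','M','P'] <:+: rest := by
          rw [← hr] at hinf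
          simp only [List.cons_append, List.nil_append] at hinf
          exact pvInfixTail _ _ _ (pvInfixTail _ _ _ (pvInfixTail _ _ _ (pvInfixTail _ _ _ hinf
            (by simp [List.isPrefixOf])) (by simp [List.isPrefixOf]))
            (by simp [List.isPrefixOf])) (by simp [List.isPrefixOf])
        intro heq
        exact ih rest (by rw [← hr] at hlen; simp at hlen ⊢; omega) hinf'
          (List.append_cancel_left heq)
      | false =>
      cases hQ : List.isPrefixOf ['s','q','r','t'] (c :: t) with
      | true =>
        obtain ⟨rest, hr⟩ := List.isPrefixOf_iff_prefix.mp hQ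
        rw [← hr]
        rw [pvRepPass 'e' _ _ _ _ (by simp), pvRepPass 'l' _ _ _ _ (by simp),
            pvRepPass 'T' _ _ _ _ (by simp)]
        rw [pvRepMatch _ _ _ (by simp) (List.isPrefixOf_iff_prefix.mpr (List.prefix_append _ _))]
        rw [List.drop_left]
        rw [pvScan_q]
        have hinf' : ['s','q','r','T','E','M','P'] <:+: rest := by
          rw [← hr] at hinf
          simp only [List.cons_append, List.nil_append] at hinf
          exact pvInfixTail _ _ _ (pvInfixTail _ _ _ (pvInfixTail _ _ _ (pvInfixTail _ _ _ hinf
            (by simp [List.isPrefixOf])) (by simp [List.isPrefixOf]))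
            (by simp [List.isPrefixOf])) (by simp [List.isPrefixOf])
        intro heq
        exact ih rest (by rw [← hr] at hlen; simp at hlen ⊢; omega) hinf'
          (List.append_cancel_left heq)
      | false =>
        rw [pvRep4Step c t hE hL hT hQ hP, pvScan_nomatch c t hE hL hT hQ]
        have hinf' : ['s','q','r','T','E','M','P'] <:+: t := pvInfixTail _ _ _ hinf hP
        intro heq
        exact ih t (by simp at hlen ⊢; omega) hinf' (by injection heq)

theorem pvStrNeq (s : String) (h : ['s','q','r','T','E','M','P'] <:+: s.toList) :
    PySem.Str.replace (PySem.Str.replace (PySem.Str.replace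
      (PySem.Str.replace s "exp" "numba_exp") "log10" "numba_log10")
      "TEMP" "temp") "sqrt" "numba_sqrt" ≠ String.ofList (pvScan s.toList) := by
  intro heq
  have h2 := congrArg String.toList heq
  rw [String.toList_ofList, PySem.Str.toList_replace, PySem.Str.toList_replace,
      PySem.Str.toList_replace, PySem.Str.toList_replace] at h2
  exact pvTight s.toList.length s.toList le_rfl h h2

-- ===== VERDICT (by name: the statement is the Claim_ definition above) =====
theorem numba_reactions_spec : Claim_unchanged_numba_reactions := by
  intro reactions_in hDom hPre
  unfold Spec_numba_reactions
  intro hnD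
  unfold numba_reactions numba_reactions_alt
  apply List.map_congr_left
  intro r hr
  cases r with
  | nil => rfl
  | cons s rest =>
    have hs : PySem.Str.isIn "sqrTEMP" s = false := by
      cases hx : PySem.Str.isIn "sqrTEMP" s with
      | false => rfl
      | true =>
        exfalso
        apply hnD
        unfold D_numba_reactions
        rw [List.any_eq_true]
        exact ⟨s :: rest, hr, by simpa using hx⟩
    have hninf : ¬ (['s','q','r','T','E','M','P'] <:+: s.toList) := by
      intro hin
      have : PySem.Str.isIn "sqrTEMP" s = true := (PySem.Str.isIn_iff_infix _ _).mpr hin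
      rw [hs] at this
      cases this
    show PySem.Str.replace (PySem.Str.replace (PySem.Str.replace
        (PySem.Str.replace s "exp" "numba_exp") "log10" "numba_log10")
        "TEMP" "temp") "sqrt" "numba_sqrt" :: rest = String.ofList (pvScan s.toList) :: rest
    rw [pvStrEq s hninf]

theorem numba_reactions_changed : Claim_changed_numba_reactions := by
  unfold Claim_changed_numba_reactions
  decide

theorem numba_reactions_tight : Claim_exact_numba_reactions := by
  intro reactions_in hDom hPre hD heq
  unfold D_numba_reactions at hD
  rw [List.any_eq_true] at hD
  obtain ⟨r, hrmem, hrin⟩ := hD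
  unfold numba_reactions numba_reactions_alt at heq
  have hpt := List.map_inj_left.mp heq r hrmem
  cases r with
  | nil => exact hPre [] hrmem rfl
  | cons s rest =>
    have hinf : ['s','q','r','T','E','M','P'] <:+: s.toList :=
      (PySem.Str.isIn_iff_infix "sqrTEMP" s).mp (by simpa using hrin)
    have h1 : PySem.Str.replace (PySem.Str.replace (PySem.Str.replace
        (PySem.Str.replace s "exp" "numba_exp") "log10" "numba_log10")
        "TEMP" "temp") "sqrt" "numba_sqrt" = String.ofList (pvScan s.toList) := by
      injection hpt
    exact pvStrNeq s hinf h1
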